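-- pv_equiv track=rewrite | github.com/animeshramesh/T-Sum | sets/intersections.py | count_itersections_of_each_set
-- ===== SOURCE A (Python) =====
-- def count_itersections_of_each_set(preprocessed_words_in_each_sentence):
--     number_of_intersections_of_each_sentence = []
--     for collections1 in preprocessed_words_in_each_sentence:
--         intersections = 0
--         for term1 in collections1:
--             intersections -= 1
--             for collection2 in preprocessed_words_in_each_sentence:
--                 if term1 in collection2:
--                     intersections += 1
--         number_of_intersections_of_each_sentence.append(intersections)
--     return number_of_intersections_of_each_sentence
-- ===== SOURCE B (Python) =====
-- def count_itersections_of_each_set(preprocessed_words_in_each_sentence):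
--     # one pass: term -> number of collections that contain it
--     counts = {}
--     for collection in preprocessed_words_in_each_sentence:
--         for term in set(collection):
--             counts[term] = counts.get(term, 0) + 1
--     return [sum(counts[term] for term in collection) - len(collection)
--             for collection in preprocessed_words_in_each_sentence]
-- ===== Notes on version B (the rewrite author's own statement) =====
-- stated objective: faster
-- what changed: Replaces the triple nested scan (for each sentence, for each term, scan every collection for membership) by a single pass that builds a term->containing-collection-count dictionary, then sums dictionary lookups per sentence.
import Mathlib
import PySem

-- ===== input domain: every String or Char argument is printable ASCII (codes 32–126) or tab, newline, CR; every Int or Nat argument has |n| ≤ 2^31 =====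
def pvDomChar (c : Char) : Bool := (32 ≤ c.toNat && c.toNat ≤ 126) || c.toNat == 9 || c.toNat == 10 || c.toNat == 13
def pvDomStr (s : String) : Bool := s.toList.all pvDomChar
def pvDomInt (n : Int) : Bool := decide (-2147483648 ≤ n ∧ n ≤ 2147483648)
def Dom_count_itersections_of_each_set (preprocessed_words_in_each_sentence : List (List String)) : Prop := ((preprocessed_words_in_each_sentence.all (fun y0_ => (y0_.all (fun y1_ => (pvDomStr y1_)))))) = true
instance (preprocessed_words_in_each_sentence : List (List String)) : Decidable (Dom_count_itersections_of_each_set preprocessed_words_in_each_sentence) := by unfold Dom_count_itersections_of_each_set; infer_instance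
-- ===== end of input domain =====

-- B replaces A's triple nested membership scan by one pass building a term→containing-collection-count
-- dictionary and a per-sentence sum of lookups (objective: faster, asymptotic).

-- ===== PORT A =====
def count_itersections_of_each_set (preprocessed_words_in_each_sentence : List (List String)) : List Int :=
  preprocessed_words_in_each_sentence.foldl (fun number_of_intersections collections1 =>
    number_of_intersections ++
      [collections1.foldl (fun intersections term1 =>
        preprocessed_words_in_each_sentence.foldl
          (fun intersections collection2 => if term1 ∈ collection2 then intersections + 1 else intersections)
          (intersections - 1)) 0]) []

-- ===== PORT B =====
-- counts = {}; for collection in pws: for term in set(collection): counts[term] = counts.get(term, 0) + 1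
def cioesCounts (preprocessed_words_in_each_sentence : List (List String)) : PySem.Dict String Int :=
  preprocessed_words_in_each_sentence.foldl
    (fun counts collection =>
      (PySem.Set.ofList collection).foldl (fun counts term => counts.insert term (counts.getD term 0 + 1)) counts)
    PySem.Dict.empty

def count_itersections_of_each_set_alt (preprocessed_words_in_each_sentence : List (List String)) : List Int :=
  let counts := cioesCounts preprocessed_words_in_each_sentence
  preprocessed_words_in_each_sentence.map
    (fun collection => (collection.map (fun term => counts.getD term 0)).sum - collection.length)

-- ===== PRECONDITION & SPEC =====
def Spec_count_itersections_of_each_set (preprocessed_words_in_each_sentence : List (List String)) (out : List Int) : Prop := out = count_itersections_of_each_set_alt preprocessed_words_in_each_sentence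
instance (preprocessed_words_in_each_sentence : List (List String)) (out : List Int) : Decidable (Spec_count_itersections_of_each_set preprocessed_words_in_each_sentence out) := by unfold Spec_count_itersections_of_each_set; infer_instance

-- ===== CLAIM (what is proved, stated in full; the proofs are below) =====
def Claim_equal_count_itersections_of_each_set : Prop := ∀ (preprocessed_words_in_each_sentence : List (List String)), Dom_count_itersections_of_each_set preprocessed_words_in_each_sentence → Spec_count_itersections_of_each_set preprocessed_words_in_each_sentence (count_itersections_of_each_set preprocessed_words_in_each_sentence)

-- ===== LEMMAS AND PROOFS =====

-- number of collections of pws containing term t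
def cioesColl (pws : List (List String)) (t : String) : Int :=
  (pws.countP (fun c => decide (t ∈ c)) : Nat)

-- the dictionary built by B counts containing collections
theorem cioesCounts_getD (pws : List (List String)) (d : PySem.Dict String Int) (t : String) :
    (pws.foldl
      (fun counts collection =>
        (PySem.Set.ofList collection).foldl (fun counts term => counts.insert term (counts.getD term 0 + 1)) counts)
      d).getD t 0 = d.getD t 0 + cioesColl pws t := by
  induction pws generalizing d with
  | nil => simp [cioesColl]
  | cons c rest ih =>
      simp only [List.foldl_cons, ih, PySem.Dict.getD_foldl_insert_add_one, cioesColl,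
        List.countP_cons]
      rcases Decidable.em (t ∈ c) with hm | hm
      · simp [hm]
        ring
      · have : (PySem.Set.ofList c).count t = 0 :=
          List.count_eq_zero_of_not_mem (by simp [PySem.Set.mem_ofList, hm])
        simp [this, hm]

-- A's inner two loops, for one sentence, as a sum of per-term collection counts
theorem cioes_inner (pws : List (List String)) (c1 : List String) (init : Int) :
    c1.foldl (fun intersections term1 =>
        pws.foldl (fun i c2 => if term1 ∈ c2 then i + 1 else i) (intersections - 1)) init
      = init + (c1.map (fun t => cioesColl pws t)).sum - c1.length := by
  induction c1 generalizing init with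
  | nil => simp
  | cons t rest ih =>
      have h : pws.foldl (fun i c2 => if t ∈ c2 then i + 1 else i) (init - 1)
          = (init - 1) + cioesColl pws t := by
        simpa [cioesColl] using PySem.List.foldl_count_if (fun c2 => decide (t ∈ c2)) pws (init - 1)
      simp only [List.foldl_cons, h, ih, List.map_cons, List.sum_cons, List.length_cons]
      push_cast
      ring

-- ===== VERDICT (by name: the statement is the Claim_ definition above) =====
theorem count_itersections_of_each_set_spec : Claim_equal_count_itersections_of_each_set := by
  intro pws _
  unfold Spec_count_itersections_of_each_set count_itersections_of_each_set
    count_itersections_of_each_set_alt cioesCounts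
  rw [PySem.List.foldl_append_singleton_eq_map]
  simp only [List.nil_append]
  apply List.map_congr_left
  intro c _
  rw [cioes_inner]
  have hd : ∀ t : String,
      (cioesCounts pws).getD t 0 = cioesColl pws t := by
    intro t
    have := cioesCounts_getD pws PySem.Dict.empty t
    simpa [cioesCounts] using this
  simp only [cioesCounts] at hd
  simp only [fun t => hd t]
  ring
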